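-- pv_equiv track=rewrite | github.com/Mzh2002/Manacher-Algorithm | ProgrammingChallenge/testcases/generate.py | brute_max_valid_helix
-- ===== SOURCE A (Python) =====
-- def brute_max_valid_helix(s: str) -> str:
--     comp = {'A':'T', 'T':'A', 'C':'G', 'G':'C'}
--     n = len(s)
--     best = ""
--     for i in range(n):
--         for j in range(i+1, n+1):
--             sub = s[i:j]
--             l, r = 0, len(sub) - 1
--             mismatches = 0
--             while l < r:
--                 if comp.get(sub[l]) != sub[r]:
--                     mismatches += 1
--                     if mismatches > 1:
--                         break
--                 l += 1
--                 r -= 1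
--             else:
--                 if len(sub) > len(best):
--                     best = sub
--     return best
-- ===== SOURCE B (Python) =====
-- def brute_max_valid_helix(s: str) -> str:
--     comp = {'A': 'T', 'T': 'A', 'C': 'G', 'G': 'C'}
--     n = len(s)
--     best_i, best_len = 0, 0
--     prev2 = []  # mismatch counts of all windows of length L-2
--     prev1 = []  # mismatch counts of all windows of length L-1
--     for L in range(1, n + 1):
--         if L == 1:
--             cur = [0] * n
--         elif L == 2:
--             cur = [0 if comp.get(s[i]) == s[i + 1] else 1 for i in range(n - 1)]
--         else:
--             cur = [prev2[i + 1] + (0 if comp.get(s[i]) == s[i + L - 1] else 1)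
--                    for i in range(n - L + 1)]
--         i = next((i for i, m in enumerate(cur) if m <= 1), None)
--         if i is not None:
--             best_i, best_len = i, L
--         prev2, prev1 = prev1, cur
--     return s[best_i:best_i + best_len]
-- ===== Notes on version B (the rewrite author's own statement) =====
-- stated objective: faster
-- what changed: Replaces the per-substring inner complement-palindrome re-scan with a length-by-length dynamic program that extends each window's mismatch count from the count of its core (two rolling rows), then takes the first valid index of each length; selection (leftmost-longest) is unchanged.
import Mathlib
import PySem

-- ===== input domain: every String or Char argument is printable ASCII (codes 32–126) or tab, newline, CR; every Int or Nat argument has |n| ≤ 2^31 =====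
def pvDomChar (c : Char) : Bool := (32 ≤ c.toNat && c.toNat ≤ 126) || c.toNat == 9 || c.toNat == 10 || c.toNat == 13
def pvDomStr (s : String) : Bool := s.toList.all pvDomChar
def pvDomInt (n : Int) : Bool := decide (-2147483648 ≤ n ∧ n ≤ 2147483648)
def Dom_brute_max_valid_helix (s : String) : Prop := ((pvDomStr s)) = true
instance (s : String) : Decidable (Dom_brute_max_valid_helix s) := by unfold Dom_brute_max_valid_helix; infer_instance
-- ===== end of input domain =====

-- B replaces A's per-substring complement-palindrome re-scan by a length-by-length DP on
-- mismatch counts (two rolling rows): objective = faster (O(n^2) vs O(n^3)).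

-- ===== PORT A =====
-- comp = {'A':'T', 'T':'A', 'C':'G', 'G':'C'}
def pvComp : PySem.Dict Char Char :=
  ((((PySem.Dict.empty).insert 'A' 'T').insert 'T' 'A').insert 'C' 'G').insert 'G' 'C'

-- the while/else loop of A: returns true iff the loop finishes without `break`
-- (indices are always in range in A, so `getD` is exact here)
def pvAWhile (sub : List Char) (l r : Nat) (m : Int) : Bool :=
  if l < r then
    if pvComp.get? (sub.getD l ' ') ≠ some (sub.getD r ' ') then
      if m + 1 > 1 then false
      else pvAWhile sub (l + 1) (r - 1) (m + 1)
    else pvAWhile sub (l + 1) (r - 1) m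
  else true
  termination_by r - l
  decreasing_by all_goals omega

def brute_max_valid_helix (s : String) : String :=
  let cs := s.toList
  let n := cs.length
  let best := (List.range n).foldl (fun best i =>
    (List.range' (i + 1) (n - i)).foldl (fun best j =>
      let sub := (cs.drop i).take (j - i)      -- s[i:j], 0 ≤ i < j ≤ n: exact
      if pvAWhile sub 0 (sub.length - 1) 0 then
        if sub.length > best.length then sub else best
      else best) best) ([] : List Char)
  String.ofList best

-- ===== PORT B =====
-- 0 if comp.get(s[i]) == s[j] else 1   (indices always in range where used)
def pvPairMis (cs : List Char) (i j : Nat) : Int :=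
  if pvComp.get? (cs.getD i ' ') = some (cs.getD j ' ') then 0 else 1

-- one row of the DP: mismatch counts of all windows of length L, from the row of length L-2
def pvRow (cs : List Char) (n L : Nat) (prev2 : List Int) : List Int :=
  if L = 1 then List.replicate n (0 : Int)
  else if L = 2 then (List.range (n - 1)).map (fun i => pvPairMis cs i (i + 1))
  else (List.range (n - L + 1)).map (fun i => prev2.getD (i + 1) 0 + pvPairMis cs i (i + L - 1))

def brute_max_valid_helix_alt (s : String) : String :=
  let cs := s.toList
  let n := cs.length
  let st := (List.range' 1 n).foldl
    (fun (st : Nat × Nat × List Int × List Int) L =>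
      let cur := pvRow cs n L st.2.2.1
      match cur.findIdx? (fun m => m ≤ 1) with
      | some i => (i, L, st.2.2.2, cur)
      | none => (st.1, st.2.1, st.2.2.2, cur))
    (0, 0, [], [])
  String.ofList ((cs.drop st.1).take st.2.1)

-- ===== PRECONDITION & SPEC =====
def Spec_brute_max_valid_helix (s : String) (out : String) : Prop := out = brute_max_valid_helix_alt s
instance (s : String) (out : String) : Decidable (Spec_brute_max_valid_helix s out) := by unfold Spec_brute_max_valid_helix; infer_instance

-- ===== CLAIM (what is proved, stated in full; the proofs are below) =====
def Claim_equal_brute_max_valid_helix : Prop := ∀ (s : String), Dom_brute_max_valid_helix s → Spec_brute_max_valid_helix s (brute_max_valid_helix s)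

-- ===== LEMMAS AND PROOFS =====

-- mismatch count of the window [l, r] of cs (absolute indices), peeled from the outside
def pvPm (cs : List Char) (l r : Nat) : Int :=
  if l < r then pvPairMis cs l r + pvPm cs (l + 1) (r - 1) else 0
  termination_by r - l
  decreasing_by omega

lemma pvPm_nonneg (cs : List Char) (l r : Nat) : 0 ≤ pvPm cs l r := by
  fun_induction pvPm with
  | case1 l r h ih =>
    have : (0:Int) ≤ pvPairMis cs l r := by unfold pvPairMis; split <;> norm_num
    omega
  | case2 l r h => norm_num

-- A's while/else loop decides "running mismatches stay ≤ 1"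
lemma pvAWhile_eq (cs : List Char) (l r : Nat) (m : Int) (h0 : 0 ≤ m) (h1 : m ≤ 1) :
    pvAWhile cs l r m = true ↔ m + pvPm cs l r ≤ 1 := by
  fun_induction pvAWhile with
  | case1 l r m hlr hne hgt =>
    have hmis : pvPairMis cs l r = 1 := by unfold pvPairMis; rw [if_neg hne]
    have hnn := pvPm_nonneg cs (l + 1) (r - 1)
    rw [pvPm]; rw [if_pos hlr, hmis]
    constructor
    · intro h; exact absurd h (by simp)
    · intro h; omega
  | case2 l r m hlr hne hle ih =>
    have hmis : pvPairMis cs l r = 1 := by unfold pvPairMis; rw [if_neg hne]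
    rw [pvPm]; rw [if_pos hlr, hmis, ih (by omega) (by omega)]
    constructor <;> intro h <;> omega
  | case3 l r m hlr he ih =>
    have hmis : pvPairMis cs l r = 0 := by
      unfold pvPairMis; rw [if_pos (not_not.mp he)]
    rw [pvPm]; rw [if_pos hlr, hmis, ih h0 h1]
    constructor <;> intro h <;> omega
  | case4 l r m hlr =>
    rw [pvPm]; rw [if_neg hlr]
    simp; omega

-- slice bridge: indexing/pm of s[i:j] in terms of cs
lemma slice_getD (cs : List Char) (i j k : Nat) (hk : k < j - i) :
    ((cs.drop i).take (j - i)).getD k ' ' = cs.getD (i + k) ' ' := by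
  simp [List.getD, List.getElem?_take_of_lt hk, List.getElem?_drop]

lemma slice_length (cs : List Char) (i j : Nat) (hj : j ≤ cs.length) :
    ((cs.drop i).take (j - i)).length = j - i := by
  simp [List.length_take, List.length_drop]; omega

lemma slice_pvPm (cs : List Char) (i j l r : Nat) (hr : r < j - i) :
    pvPm ((cs.drop i).take (j - i)) l r = pvPm cs (i + l) (i + r) := by
  induction r using Nat.strong_induction_on generalizing l with
  | _ r ih =>
    conv_lhs => rw [pvPm]
    conv_rhs => rw [pvPm]
    by_cases h : l < r
    · rw [if_pos h, if_pos (by omega : i + l < i + r)]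
      have h1 : pvPairMis ((cs.drop i).take (j - i)) l r = pvPairMis cs (i + l) (i + r) := by
        unfold pvPairMis
        rw [slice_getD cs i j l (by omega), slice_getD cs i j r hr]
      have h2 := ih (r - 1) (by omega) (l + 1) (by omega)
      have h3 : i + r - 1 = i + (r - 1) := by omega
      rw [h1, h3, h2]
      have h4 : i + (l + 1) = i + l + 1 := by omega
      rw [h4]
    · rw [if_neg h, if_neg (by omega : ¬ i + l < i + r)]

-- validity of the length-L window starting at i
def pvValid (cs : List Char) (i L : Nat) : Bool := pvPm cs i (i + L - 1) ≤ 1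

lemma pvAWhile_valid (cs : List Char) (i j : Nat) (hij : i < j) (hj : j ≤ cs.length) :
    pvAWhile ((cs.drop i).take (j - i)) 0 (((cs.drop i).take (j - i)).length - 1) 0
      = pvValid cs i (j - i) := by
  rw [slice_length cs i j hj]
  have h := pvAWhile_eq ((cs.drop i).take (j - i)) 0 ((j - i) - 1) 0 (by norm_num) (by norm_num)
  rw [slice_pvPm cs i j 0 ((j - i) - 1) (by omega)] at h
  unfold pvValid
  rw [Bool.eq_iff_iff, h]
  have h3 : i + (j - i) - 1 = i + (j - i - 1) := by omega
  rw [h3]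
  simp

-- the specified DP row
def pvRowSpec (cs : List Char) (L : Nat) : List Int :=
  (List.range (cs.length - L + 1)).map (fun i => pvPm cs i (i + L - 1))

lemma pvRow_correct (cs : List Char) (L : Nat) (prev2 : List Int) (hL : 1 ≤ L)
    (hLe : L ≤ cs.length) (hprev : 3 ≤ L → prev2 = pvRowSpec cs (L - 2)) :
    pvRow cs cs.length L prev2 = pvRowSpec cs L := by
  unfold pvRow pvRowSpec
  by_cases h1 : L = 1
  · subst h1
    rw [if_pos rfl]
    refine (List.eq_replicate_iff.mpr ⟨by simpa using by omega, ?_⟩).symm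
    intro b hb
    obtain ⟨i, _, hi⟩ := List.mem_map.mp hb
    rw [pvPm] at hi
    simpa using hi.symm
  · by_cases h2 : L = 2
    · subst h2
      rw [if_neg h1, if_pos rfl]
      have hn : cs.length - 2 + 1 = cs.length - 1 := by omega
      rw [hn]
      refine List.map_congr_left ?_
      intro i _
      rw [pvPm]
      rw [if_pos (by omega : i < i + 2 - 1)]
      rw [pvPm]
      simp
    · rw [if_neg h1, if_neg h2]
      rw [hprev (by omega)]
      refine List.map_congr_left ?_
      intro i hi
      have hi' : i < cs.length - L + 1 := List.mem_range.mp hi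
      unfold pvRowSpec
      rw [PySem.List.getD_map_range _ _ _ _ (by omega)]
      conv_rhs => rw [pvPm]
      rw [if_pos (by omega : i < i + L - 1)]
      have e1 : i + 1 + (L - 2) - 1 = i + L - 1 - 1 := by omega
      rw [e1]
      ring

-- the best (start, length) pair after considering all lengths 1..L0
def pvBestUpTo (cs : List Char) : Nat → Nat × Nat
  | 0 => (0, 0)
  | L + 1 =>
    match (pvRowSpec cs (L + 1)).findIdx? (fun m => m ≤ 1) with
    | some i => (i, L + 1)
    | none => pvBestUpTo cs L

-- B's fold computes pvBestUpTo together with the two rolling rows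
lemma pvB_fold (cs : List Char) (n0 : Nat) (hn : n0 ≤ cs.length) :
    (List.range' 1 n0).foldl
      (fun (st : Nat × Nat × List Int × List Int) L =>
        let cur := pvRow cs cs.length L st.2.2.1
        match cur.findIdx? (fun m => m ≤ 1) with
        | some i => (i, L, st.2.2.2, cur)
        | none => (st.1, st.2.1, st.2.2.2, cur))
      (0, 0, [], [])
    = ((pvBestUpTo cs n0).1, (pvBestUpTo cs n0).2,
       (if n0 ≤ 1 then [] else pvRowSpec cs (n0 - 1)),
       (if n0 = 0 then [] else pvRowSpec cs n0)) := by
  induction n0 with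
  | zero => simp [pvBestUpTo]
  | succ k ih =>
    rw [List.range'_1_concat, List.foldl_append, ih (by omega)]
    simp only [List.foldl_cons, List.foldl_nil]
    have e : 1 + k = k + 1 := by omega
    rw [e]
    have hcur : pvRow cs cs.length (k + 1) (if k ≤ 1 then [] else pvRowSpec cs (k - 1))
        = pvRowSpec cs (k + 1) := by
      refine pvRow_correct cs (k + 1) _ (by omega) (by omega) ?_
      intro h3
      rw [if_neg (by omega)]
      rfl
    simp only [hcur]
    cases hf : (pvRowSpec cs (k + 1)).findIdx? (fun m => decide (m ≤ 1)) with
    | some i =>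
      simp only [hf, pvBestUpTo]
      by_cases hk : k = 0 <;> simp [hk]
    | none =>
      simp only [hf, pvBestUpTo]
      by_cases hk : k = 0 <;> simp [hk]

-- characterisation of pvBestUpTo
lemma pvBestUpTo_ge (cs : List Char) (n0 L : Nat) (hL : 1 ≤ L) (hLn : L ≤ n0)
    (h : ∃ i, (pvRowSpec cs L).findIdx? (fun m => m ≤ 1) = some i) :
    L ≤ (pvBestUpTo cs n0).2 := by
  induction n0 with
  | zero => omega
  | succ k ih =>
    unfold pvBestUpTo
    cases hf : (pvRowSpec cs (k + 1)).findIdx? (fun m => decide (m ≤ 1)) with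
    | some i => simpa using hLn
    | none =>
      simp only []
      rcases Nat.lt_or_ge k L with hk | hk
      · have : L = k + 1 := by omega
        subst this
        obtain ⟨i, hi⟩ := h
        rw [hi] at hf
        exact absurd hf (by simp)
      · exact ih hk

lemma pvBestUpTo_le (cs : List Char) (n0 : Nat) : (pvBestUpTo cs n0).2 ≤ n0 := by
  induction n0 with
  | zero => simp [pvBestUpTo]
  | succ k ih =>
    unfold pvBestUpTo
    cases hf : (pvRowSpec cs (k + 1)).findIdx? (fun m => decide (m ≤ 1)) with
    | some i => simp
    | none => simpa using by omega

lemma pvBestUpTo_found (cs : List Char) (n0 : Nat) (h : 1 ≤ (pvBestUpTo cs n0).2) :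
    (pvRowSpec cs (pvBestUpTo cs n0).2).findIdx? (fun m => m ≤ 1)
      = some (pvBestUpTo cs n0).1 := by
  induction n0 with
  | zero => simp [pvBestUpTo] at h
  | succ k ih =>
    have hs : pvBestUpTo cs (k + 1)
        = match (pvRowSpec cs (k + 1)).findIdx? (fun m => decide (m ≤ 1)) with
          | some i => (i, k + 1)
          | none => pvBestUpTo cs k := rfl
    cases hf : (pvRowSpec cs (k + 1)).findIdx? (fun m => decide (m ≤ 1)) with
    | some i => rw [hs, hf]; simpa using hf
    | none => rw [hs, hf] at h ⊢; exact ih h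

-- generic "keep the strictly longer candidate" fold
def pvUpd (b x : List Char) : List Char := if x.length > b.length then x else b

lemma foldl_pvUpd_le (b : List Char) (l : List (List Char))
    (h : ∀ x ∈ l, x.length ≤ b.length) : l.foldl pvUpd b = b := by
  induction l with
  | nil => rfl
  | cons x t ih =>
    rw [List.foldl_cons]
    have hx : pvUpd b x = b := by
      unfold pvUpd
      rw [if_neg (by simpa using h x (by simp))]
    rw [hx]
    exact ih (fun y hy => h y (by simp [hy]))

lemma foldl_pvUpd_firstmax (b : List Char) (l : List (List Char)) (M : Nat)
    (hM : ∀ x ∈ l, x.length ≤ M) (hb : b.length < M) (x0 : List Char)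
    (hfind : l.find? (fun x => x.length = M) = some x0) :
    l.foldl pvUpd b = x0 := by
  induction l generalizing b with
  | nil => simp at hfind
  | cons x t ih =>
    rw [List.foldl_cons]
    by_cases hx : x.length = M
    · have hx0 : x0 = x := by
        rw [List.find?_cons_of_pos (by simpa using hx)] at hfind
        exact (Option.some_inj.mp hfind).symm
      rw [hx0]
      have hupd : pvUpd b x = x := by unfold pvUpd; rw [if_pos (by omega)]
      rw [hupd]
      exact foldl_pvUpd_le x t (fun y hy => by rw [hx]; exact hM y (by simp [hy]))
    · rw [List.find?_cons_of_neg (by simpa using hx)] at hfind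
      have hxM : x.length < M := lt_of_le_of_ne (hM x (by simp)) hx
      have hb' : (pvUpd b x).length < M := by unfold pvUpd; split <;> omega
      exact ih (pvUpd b x) (fun y hy => hM y (by simp [hy])) hb' hfind

-- first element of a list satisfying p, when p holds exactly at x
lemma find?_unique_pv {α : Type} (l : List α) (p : α → Bool) (x : α) (hx : x ∈ l)
    (hp : p x = true) (hu : ∀ y ∈ l, p y = true → y = x) : l.find? p = some x := by
  induction l with
  | nil => simp at hx
  | cons a t ih =>
    by_cases ha : p a = true
    · rw [List.find?_cons_of_pos ha, hu a (by simp) ha]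
    · rw [List.find?_cons_of_neg ha]
      have hx' : x ∈ t := by
        rcases List.mem_cons.mp hx with h | h
        · subst h; exact absurd hp ha
        · exact h
      exact ih hx' (fun y hy => hu y (by simp [hy]))

-- A's candidate substrings, in A's traversal order
def pvSlice (cs : List Char) (i j : Nat) : List Char := (cs.drop i).take (j - i)
def pvP (x : List Char) : Bool := pvAWhile x 0 (x.length - 1) 0
def pvBlk (cs : List Char) (i : Nat) : List (List Char) :=
  (List.range' (i + 1) (cs.length - i)).map (fun j => pvSlice cs i j)
def pvCands (cs : List Char) : List (List Char) := (List.range' 0 cs.length).flatMap (pvBlk cs)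

lemma pvA_result (s : String) :
    brute_max_valid_helix s
      = String.ofList (((pvCands s.toList).filter pvP).foldl pvUpd []) := by
  unfold brute_max_valid_helix pvCands
  simp only []
  rw [List.foldl_filter, List.foldl_flatMap, List.range_eq_range']
  congr 1
  congr 1
  funext b i
  unfold pvBlk
  rw [List.foldl_map]
  rfl

lemma pvB_result (s : String) :
    brute_max_valid_helix_alt s
      = String.ofList ((s.toList.drop (pvBestUpTo s.toList s.toList.length).1).take
          (pvBestUpTo s.toList s.toList.length).2) := by
  unfold brute_max_valid_helix_alt
  simp only []
  rw [pvB_fold s.toList s.toList.length (le_refl _)]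


lemma pvRowSpec_length (cs : List Char) (L : Nat) :
    (pvRowSpec cs L).length = cs.length - L + 1 := by
  simp [pvRowSpec]

lemma pvRowSpec_getElem (cs : List Char) (L i : Nat) (h : i < cs.length - L + 1) :
    (pvRowSpec cs L)[i]'(by rw [pvRowSpec_length]; omega) = pvPm cs i (i + L - 1) := by
  simp [pvRowSpec]

lemma pvM_pos (cs : List Char) (hn : 1 ≤ cs.length) : 1 ≤ (pvBestUpTo cs cs.length).2 := by
  cases hf : (pvRowSpec cs 1).findIdx? (fun m => decide (m ≤ 1)) with
  | none =>
    have h0 : pvPm cs 0 (0 + 1 - 1) ∈ pvRowSpec cs 1 := by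
      unfold pvRowSpec
      exact List.mem_map_of_mem (by simp)
    have := List.findIdx?_eq_none_iff.mp hf _ h0
    rw [pvPm] at this
    simp at this
  | some i => exact pvBestUpTo_ge cs cs.length 1 (le_refl _) hn ⟨i, hf⟩

-- every valid candidate is at most as long as the DP's best length
lemma pvCands_le (cs : List Char) (x : List Char) (hx : x ∈ (pvCands cs).filter pvP) :
    x.length ≤ (pvBestUpTo cs cs.length).2 := by
  obtain ⟨hx1, hx2⟩ := List.mem_filter.mp hx
  obtain ⟨i, hi, hxi⟩ := List.mem_flatMap.mp hx1
  obtain ⟨j, hj, rfl⟩ := List.mem_map.mp hxi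
  have hi' := List.mem_range'_1.mp hi
  have hj' := List.mem_range'_1.mp hj
  have hij : i < j := by omega
  have hjn : j ≤ cs.length := by omega
  have hlen : (pvSlice cs i j).length = j - i := slice_length cs i j hjn
  rw [hlen]
  have hvalid : pvValid cs i (j - i) = true := by
    rw [← pvAWhile_valid cs i j hij hjn]
    exact hx2
  refine pvBestUpTo_ge cs cs.length (j - i) (by omega) (by omega) ?_
  have hmem : pvPm cs i (i + (j - i) - 1) ∈ pvRowSpec cs (j - i) := by
    unfold pvRowSpec
    exact List.mem_map_of_mem (by simp; omega)
  have hany : (pvRowSpec cs (j - i)).any (fun m => decide (m ≤ 1)) = true := by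
    rw [List.any_eq_true]
    refine ⟨_, hmem, ?_⟩
    unfold pvValid at hvalid
    simpa using hvalid
  have := List.findIdx?_isSome (xs := pvRowSpec cs (j - i)) (p := fun m => decide (m ≤ 1))
  rw [hany] at this
  exact Option.isSome_iff_exists.mp this

-- the first valid candidate (in A's order) of the best length is the DP's answer
lemma pvCands_find (cs : List Char) (hn : 1 ≤ cs.length) :
    ((pvCands cs).filter pvP).find?
        (fun x => decide (x.length = (pvBestUpTo cs cs.length).2))
      = some (pvSlice cs (pvBestUpTo cs cs.length).1
          ((pvBestUpTo cs cs.length).1 + (pvBestUpTo cs cs.length).2)) := by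
  set M := (pvBestUpTo cs cs.length).2 with hM
  set istar := (pvBestUpTo cs cs.length).1 with histar
  have hM1 : 1 ≤ M := pvM_pos cs hn
  have hMn : M ≤ cs.length := pvBestUpTo_le cs cs.length
  have hfound := pvBestUpTo_found cs cs.length hM1
  rw [← hM, ← histar] at hfound
  obtain ⟨hilt, hpi, hjlt⟩ := List.findIdx?_eq_some_iff_getElem.mp hfound
  rw [pvRowSpec_length] at hilt
  rw [pvRowSpec_getElem cs M istar hilt] at hpi
  have histn : istar + M ≤ cs.length := by omega
  rw [List.find?_filter]
  unfold pvCands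
  have hsplit : List.range' 0 cs.length
      = List.range' 0 istar ++ List.range' istar (cs.length - istar) := by
    have h : cs.length = istar + (cs.length - istar) := by omega
    conv_lhs => rw [h]
    simpa using (List.range'_append_1 (s := 0) (m := istar) (n := cs.length - istar)).symm
  rw [hsplit, List.flatMap_append, List.find?_append]
  have hpart1 : ((List.range' 0 istar).flatMap (pvBlk cs)).find?
      (fun a => decide (pvP a = true ∧ (decide (a.length = M)) = true)) = none := by
    rw [List.find?_eq_none]
    intro x hx
    obtain ⟨i, hi, hxi⟩ := List.mem_flatMap.mp hx
    obtain ⟨j, hj, rfl⟩ := List.mem_map.mp hxi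
    have hi' := List.mem_range'_1.mp hi
    have hj' := List.mem_range'_1.mp hj
    have hij : i < j := by omega
    have hjn : j ≤ cs.length := by omega
    simp only [decide_eq_true_eq, not_and]
    intro hpx hlx
    rw [show (pvSlice cs i j).length = j - i from slice_length cs i j hjn] at hlx
    have hvalid : pvValid cs i (j - i) = true := by
      rw [← pvAWhile_valid cs i j hij hjn]; exact hpx
    have := hjlt i (by omega)
    rw [pvRowSpec_getElem cs M i (by omega)] at this
    unfold pvValid at hvalid
    rw [hlx] at hvalid
    simp at hvalid this
    omega
  rw [hpart1, Option.none_or]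
  have hrest : cs.length - istar = (cs.length - istar - 1) + 1 := by omega
  rw [hrest, List.range'_succ, List.flatMap_cons, List.find?_append]
  have hblk : (pvBlk cs istar).find?
      (fun a => decide (pvP a = true ∧ (decide (a.length = M)) = true))
      = some (pvSlice cs istar (istar + M)) := by
    unfold pvBlk
    rw [List.find?_map]
    have hfu : (List.range' (istar + 1) (cs.length - istar)).find?
        ((fun a => decide (pvP a = true ∧ (decide (a.length = M)) = true)) ∘ (fun j => pvSlice cs istar j))
        = some (istar + M) := by
      refine find?_unique_pv _ _ (istar + M) ?_ ?_ ?_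
      · rw [List.mem_range'_1]; omega
      · simp only [Function.comp_apply, decide_eq_true_eq]
        have hl : (pvSlice cs istar (istar + M)).length = M := by
          unfold pvSlice
          rw [slice_length cs istar (istar + M) histn]
          omega
        refine ⟨?_, by simp [hl]⟩
        unfold pvP pvSlice
        rw [pvAWhile_valid cs istar (istar + M) (by omega) histn]
        unfold pvValid
        have e : istar + (istar + M - istar) - 1 = istar + M - 1 := by omega
        rw [e]
        exact hpi
      · intro y hy hpy
        have hy' := List.mem_range'_1.mp hy
        simp only [Function.comp_apply, decide_eq_true_eq] at hpy
        have hyl : (pvSlice cs istar y).length = y - istar := by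
          unfold pvSlice
          exact slice_length cs istar y (by omega)
        rw [hyl] at hpy
        omega
    rw [hfu]
    rfl
  rw [hblk]
  rfl

-- ===== VERDICT (by name: the statement is the Claim_ definition above) =====
theorem brute_max_valid_helix_spec : Claim_equal_brute_max_valid_helix := by
  unfold Claim_equal_brute_max_valid_helix Spec_brute_max_valid_helix
  intro s _
  rw [pvA_result, pvB_result]
  by_cases hn : s.toList.length = 0
  · have hnil : s.toList = [] := List.eq_nil_of_length_eq_zero hn
    rw [hnil]
    rfl
  · have hn1 : 1 ≤ s.toList.length := by omega
    set cs := s.toList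
    set M := (pvBestUpTo cs cs.length).2 with hM
    set istar := (pvBestUpTo cs cs.length).1 with histar
    have hM1 : 1 ≤ M := pvM_pos cs hn1
    have hfold : ((pvCands cs).filter pvP).foldl pvUpd []
        = pvSlice cs istar (istar + M) := by
      refine foldl_pvUpd_firstmax [] _ M (fun x hx => pvCands_le cs x hx)
        (by simpa using hM1) _ ?_
      exact pvCands_find cs hn1
    rw [hfold]
    unfold pvSlice
    congr 1
    congr 1
    omega
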